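-- pv_equiv track=rewrite | github.com/Aseptrisna/Algoritma-dan-Pemrograman | soal2.py | cari_subderet_menaik
-- ===== SOURCE A (Python) =====
-- def cari_subderet_menaik(arr):
--     subderet = []
--     subderet_saat_ini = [arr[0]]
--
--     for i in range(1, len(arr)):
--         if arr[i] > arr[i - 1]:
--             subderet_saat_ini.append(arr[i])
--         else:
--             if len(subderet_saat_ini) > 1:
--                 subderet.append(subderet_saat_ini)
--             subderet_saat_ini = [arr[i]]
--
--     if len(subderet_saat_ini) > 1:
--         subderet.append(subderet_saat_ini)
--
--     return subderet
-- ===== SOURCE B (Python) =====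
-- def cari_subderet_menaik(arr):
--     n = len(arr)
--     breaks = [i for i in range(1, n) if arr[i] <= arr[i - 1]]
--     bounds = [0] + breaks + [n]
--     return [arr[b:e] for b, e in zip(bounds, bounds[1:]) if e - b > 1]
-- ===== Notes on version B (the rewrite author's own statement) =====
-- stated objective: alternative
-- what changed: B replaces A's single streaming loop with a current-run accumulator by a staged boundary computation: it first collects the break indices (i with arr[i] <= arr[i-1]), forms the boundary list of 0, the breaks, and n, and then slices the array between consecutive boundaries, keeping slices longer than 1.
import Mathlib
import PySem

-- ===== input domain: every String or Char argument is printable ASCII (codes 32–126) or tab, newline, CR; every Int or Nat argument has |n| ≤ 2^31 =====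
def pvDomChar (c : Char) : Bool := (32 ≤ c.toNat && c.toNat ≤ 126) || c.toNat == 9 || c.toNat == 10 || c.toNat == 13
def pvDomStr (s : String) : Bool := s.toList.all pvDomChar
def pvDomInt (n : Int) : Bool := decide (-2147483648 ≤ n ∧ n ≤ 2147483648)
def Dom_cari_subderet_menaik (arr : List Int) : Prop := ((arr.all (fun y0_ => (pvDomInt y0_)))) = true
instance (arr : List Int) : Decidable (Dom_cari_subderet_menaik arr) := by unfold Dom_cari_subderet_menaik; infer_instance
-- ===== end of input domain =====

-- B replaces A's streaming accumulator loop by a staged computation: collect the break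
-- indices, form the boundary list of 0, the breaks, and n, then slice the array between consecutive
-- boundaries keeping slices longer than 1 (objective: alternative decomposition, no speed claim).

-- ===== PORT A =====
-- literal transliteration of A; the first-element read and the loop's index reads are in range for every index the
-- loop produces whenever the list is nonempty (Pre_ excludes the empty list, where Python raises),
-- so pyGetD with default 0 is exact there.
def cari_subderet_menaik (arr : List Int) : List (List Int) :=
  let st := (PySem.List.pyRange 1 (arr.length : Int) 1).foldl
    (fun (st : List (List Int) × List Int) (i : Int) =>
      if PySem.List.pyGetD arr i 0 > PySem.List.pyGetD arr (i - 1) 0 then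
        (st.1, st.2 ++ [PySem.List.pyGetD arr i 0])
      else
        ((if st.2.length > 1 then st.1 ++ [st.2] else st.1), [PySem.List.pyGetD arr i 0]))
    ([], [PySem.List.pyGetD arr 0 0])
  if st.2.length > 1 then st.1 ++ [st.2] else st.1

-- ===== PORT B =====
-- literal transliteration of Source B; every index the comprehension produces is in range, so the
-- defaulted accesses are exact; bounds[1:] is PySem.List.slice bounds (some 1) none.
def cari_subderet_menaik_alt (arr : List Int) : List (List Int) :=
  let n : Int := (arr.length : Int)
  let breaks := (PySem.List.pyRange 1 n 1).filter
    (fun i => decide (PySem.List.pyGetD arr i 0 ≤ PySem.List.pyGetD arr (i - 1) 0))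
  let bounds := [(0 : Int)] ++ breaks ++ [n]
  ((bounds.zip (PySem.List.slice bounds (some 1) none)).filter
      (fun be => decide (be.2 - be.1 > 1))).map
    (fun be => PySem.List.slice arr (some be.1) (some be.2))

-- ===== PRECONDITION & SPEC =====
-- Pre_ excludes only the empty list, where the Python A raises IndexError reading the first element.
def Pre_cari_subderet_menaik (arr : List Int) : Prop := arr ≠ []
instance (arr : List Int) : Decidable (Pre_cari_subderet_menaik arr) := by unfold Pre_cari_subderet_menaik; infer_instance
def pvWitness_cari_subderet_menaik : List Int := [3, 1, 2]
def Spec_cari_subderet_menaik (arr : List Int) (out : List (List Int)) : Prop := out = cari_subderet_menaik_alt arr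
instance (arr : List Int) (out : List (List Int)) : Decidable (Spec_cari_subderet_menaik arr out) := by unfold Spec_cari_subderet_menaik; infer_instance

-- ===== CLAIM (what is proved, stated in full; the proofs are below) =====
def Claim_equal_cari_subderet_menaik : Prop := ∀ (arr : List Int), Dom_cari_subderet_menaik arr → Pre_cari_subderet_menaik arr → Spec_cari_subderet_menaik arr (cari_subderet_menaik arr)
-- ===== LEMMAS AND PROOFS =====

-- the list of maximal increasing runs of a :: ys, structurally
def runsSpec (a : Int) : List Int → List (List Int)
  | [] => [[a]]
  | x :: xs =>
    let r := runsSpec x xs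
    if x > a then ([a] ++ r.headD []) :: r.tail else [a] :: r

lemma runsSpec_shape : ∀ (l : List Int) (a : Int), ∃ t cs, runsSpec a l = (a :: t) :: cs := by
  intro l
  induction l with
  | nil => intro a; exact ⟨[], [], rfl⟩
  | cons x xs ih =>
    intro a
    obtain ⟨t, cs, h⟩ := ih x
    by_cases hx : x > a
    · exact ⟨x :: t, cs, by simp [runsSpec, hx, h]⟩
    · exact ⟨[], runsSpec x xs, by simp [runsSpec, hx]⟩

-- one step of A's loop, on the pair (previous element, current element)
def stepA (st : List (List Int) × List Int) (p q : Int) : List (List Int) × List Int :=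
  if q > p then (st.1, st.2 ++ [q])
  else ((if st.2.length > 1 then st.1 ++ [st.2] else st.1), [q])

-- A's final flush
def finA (st : List (List Int) × List Int) : List (List Int) :=
  if st.2.length > 1 then st.1 ++ [st.2] else st.1

lemma A_loop : ∀ (ys : List Int) (a : Int) (acc : List (List Int)) (cur : List Int),
    finA ((List.range ys.length).foldl
        (fun st k => stepA st ((a :: ys).getD k 0) (ys.getD k 0)) (acc, cur))
    = acc ++ ((cur ++ ((runsSpec a ys).headD []).tail) :: (runsSpec a ys).tail).filter
        (fun c => decide (c.length > 1)) := by
  intro ys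
  induction ys with
  | nil =>
    intro a acc cur
    by_cases h : cur.length > 1 <;> simp [finA, runsSpec, h]
  | cons y ys' ih =>
    intro a acc cur
    obtain ⟨t, cs, hr⟩ := runsSpec_shape ys' y
    rw [List.length_cons, List.range_succ_eq_map, List.foldl_cons, List.foldl_map]
    simp only [List.getD_cons_zero, List.getD_cons_succ]
    by_cases h : y > a
    · rw [show stepA (acc, cur) a y = (acc, cur ++ [y]) by simp [stepA, h]]
      rw [ih y acc (cur ++ [y])]
      simp [runsSpec, h, hr]
    · rw [show stepA (acc, cur) a y
          = ((if cur.length > 1 then acc ++ [cur] else acc), [y]) by simp [stepA, h]]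
      rw [ih y _ [y]]
      simp only [runsSpec, hr]
      rw [if_neg h]
      by_cases hc : cur.length > 1 <;>
        simp [hc, List.filter_cons]

lemma A_side (a : Int) (ys : List Int) :
    cari_subderet_menaik (a :: ys)
    = finA ((List.range ys.length).foldl
        (fun st k => stepA st ((a :: ys).getD k 0) (ys.getD k 0)) ([], [a])) := by
  unfold cari_subderet_menaik finA
  have hrange : PySem.List.pyRange 1 (((a :: ys).length : Int)) 1
      = (List.range ys.length).map (fun k : Nat => 1 + (k : Int)) := by
    rw [PySem.List.pyRange_one]
    norm_num
  rw [hrange, List.foldl_map]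
  have hfun : (fun (st : List (List Int) × List Int) (k : Nat) =>
      if PySem.List.pyGetD (a :: ys) (1 + (k : Int)) 0 > PySem.List.pyGetD (a :: ys) (1 + (k : Int) - 1) 0 then
        (st.1, st.2 ++ [PySem.List.pyGetD (a :: ys) (1 + (k : Int)) 0])
      else
        ((if st.2.length > 1 then st.1 ++ [st.2] else st.1), [PySem.List.pyGetD (a :: ys) (1 + (k : Int)) 0]))
      = (fun st k => stepA st ((a :: ys).getD k 0) (ys.getD k 0)) := by
    funext st k
    have e1 : PySem.List.pyGetD (a :: ys) (1 + (k : Int)) 0 = ys.getD k 0 := by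
      rw [show ((1 : Int) + (k : Int)) = ((k + 1 : Nat) : Int) by push_cast; ring,
        PySem.List.pyGetD_natCast, List.getD_cons_succ]
    have e2 : PySem.List.pyGetD (a :: ys) (1 + (k : Int) - 1) 0 = (a :: ys).getD k 0 := by
      rw [show ((1 : Int) + (k : Int) - 1) = ((k : Nat) : Int) by ring,
        PySem.List.pyGetD_natCast]
    rw [e1, e2]
    simp [stepA]
  rw [hfun, PySem.List.pyGetD_zero_cons]

-- ===== B-side machinery: break indices and boundary segments, on the Nat level =====

def breaksN (arr : List Int) : List Nat :=
  (List.range' 1 (arr.length - 1)).filter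
    (fun i => decide (arr.getD i 0 ≤ arr.getD (i - 1) 0))

def segs (arr : List Int) : Nat → List Nat → List (List Int)
  | _, [] => []
  | b, e :: bs => (arr.drop b).take (e - b) :: segs arr e bs

lemma segs_shift (a : Int) (tl : List Int) :
    ∀ (bs : List Nat) (b : Nat),
    segs (a :: tl) (b + 1) (bs.map (· + 1)) = segs tl b bs := by
  intro bs
  induction bs with
  | nil => intro b; rfl
  | cons e bs ih =>
    intro b
    simp only [List.map_cons, segs, List.drop_succ_cons, Nat.add_sub_add_right, ih]

lemma breaksN_cons (a y : Int) (ys : List Int) :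
    breaksN (a :: y :: ys)
    = (if y ≤ a then [1] else []) ++ (breaksN (y :: ys)).map (· + 1) := by
  unfold breaksN
  have hlen : (a :: y :: ys).length - 1 = ((y :: ys).length - 1) + 1 := by
    simp
  rw [hlen, List.range'_succ]
  have hshift : List.range' 2 ((y :: ys).length - 1)
      = (List.range' 1 ((y :: ys).length - 1)).map (· + 1) := by
    rw [show (2 : Nat) = 1 + 1 by rfl, ← List.map_add_range']
    simp [Nat.add_comm]
  rw [List.filter_cons, hshift, List.filter_map]
  have hc1 : (decide ((a :: y :: ys).getD 1 0 ≤ (a :: y :: ys).getD 0 0)) = decide (y ≤ a) := by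
    simp
  have hcongr : List.filter
        ((fun i => decide ((a :: y :: ys).getD i 0 ≤ (a :: y :: ys).getD (i - 1) 0)) ∘ (· + 1))
        (List.range' 1 ((y :: ys).length - 1))
      = List.filter (fun i => decide ((y :: ys).getD i 0 ≤ (y :: ys).getD (i - 1) 0))
        (List.range' 1 ((y :: ys).length - 1)) := by
    apply List.filter_congr
    intro k hk
    have hk1 : 1 ≤ k := (List.mem_range'_1.mp hk).1
    obtain ⟨j, rfl⟩ := Nat.exists_eq_add_of_le hk1
    simp [Function.comp, Nat.add_comm 1 j]
  rw [hcongr, hc1]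
  by_cases h : y ≤ a <;> simp [h]

lemma segs_main : ∀ (ys : List Int) (a : Int),
    segs (a :: ys) 0 (breaksN (a :: ys) ++ [(a :: ys).length]) = runsSpec a ys := by
  intro ys
  induction ys with
  | nil =>
    intro a
    simp [breaksN, segs, runsSpec]
  | cons y ys' ih =>
    intro a
    rw [breaksN_cons]
    have hlen : ([(a :: y :: ys').length] : List Nat) = [(y :: ys').length].map (· + 1) := by
      simp
    by_cases h : y ≤ a
    · rw [if_pos h]
      have : ([1] ++ (breaksN (y :: ys')).map (· + 1)) ++ [(a :: y :: ys').length]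
          = 1 :: ((breaksN (y :: ys') ++ [(y :: ys').length]).map (· + 1)) := by
        simp
      rw [this]
      show (a :: y :: ys').take 1 :: segs (a :: y :: ys') (0 + 1)
          ((breaksN (y :: ys') ++ [(y :: ys').length]).map (· + 1))
        = runsSpec a (y :: ys')
      rw [segs_shift, ih y]
      have hng : ¬ y > a := not_lt.mpr h
      simp [runsSpec, hng]
    · rw [if_neg h]
      have hgt : y > a := lt_of_not_ge h
      obtain ⟨e, rest, hcons⟩ :=
        List.exists_cons_of_ne_nil (l := breaksN (y :: ys') ++ [(y :: ys').length]) (by simp)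
      have : ([] ++ (breaksN (y :: ys')).map (· + 1)) ++ [(a :: y :: ys').length]
          = (breaksN (y :: ys') ++ [(y :: ys').length]).map (· + 1) := by
        simp
      rw [this, hcons, List.map_cons]
      show (a :: y :: ys').take (e + 1) :: segs (a :: y :: ys') (e + 1) (rest.map (· + 1))
        = runsSpec a (y :: ys')
      have hseg : segs (a :: y :: ys') (e + 1) (rest.map (· + 1)) = segs (y :: ys') e rest :=
        segs_shift a (y :: ys') rest e
      have hIH : ((y :: ys').take e) :: segs (y :: ys') e rest = runsSpec y ys' := by
        have := ih y
        rwa [hcons] at this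
      rw [hseg]
      simp only [runsSpec, if_pos hgt, ← hIH]
      simp

lemma zip_tail_segs (arr : List Int) :
    ∀ (bs : List Nat) (b : Nat),
    ((b :: bs).zip bs).map (fun be => (arr.drop be.1).take (be.2 - be.1)) = segs arr b bs := by
  intro bs
  induction bs with
  | nil => intro b; rfl
  | cons e bs ih => intro b; simp only [List.zip_cons_cons, List.map_cons, segs, ih]

lemma filter_map_comm (arr : List Int) :
    ∀ (l : List (Nat × Nat)), (∀ p ∈ l, p.2 ≤ arr.length) →
    (l.filter (fun be => decide (be.1 + 1 < be.2))).map
        (fun be => (arr.drop be.1).take (be.2 - be.1))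
    = (l.map (fun be => (arr.drop be.1).take (be.2 - be.1))).filter
        (fun s => decide (s.length > 1)) := by
  intro l
  induction l with
  | nil => intro _; rfl
  | cons p l ih =>
    intro h
    have hp : p.2 ≤ arr.length := h p (by simp)
    have hrest : ∀ q ∈ l, q.2 ≤ arr.length := fun q hq => h q (List.mem_cons_of_mem _ hq)
    have hlen : ((arr.drop p.1).take (p.2 - p.1)).length = min (p.2 - p.1) (arr.length - p.1) := by
      simp
    have hcond : (decide (p.1 + 1 < p.2)) = decide (((arr.drop p.1).take (p.2 - p.1)).length > 1) := by
      rw [hlen]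
      apply decide_eq_decide.mpr
      omega
    rw [List.filter_cons, List.map_cons, List.filter_cons, ← hcond]
    by_cases hc : p.1 + 1 < p.2
    · simp [hc, List.map_cons, ih hrest]
    · simp [hc, ih hrest]

lemma B_side (a : Int) (ys : List Int) :
    cari_subderet_menaik_alt (a :: ys)
    = (runsSpec a ys).filter (fun run => decide (run.length > 1)) := by
  set arr := a :: ys with harr
  have hne : arr ≠ [] := by simp [harr]
  -- Step 1: the Int break list is the cast of breaksN
  have hbreaks : (PySem.List.pyRange 1 (arr.length : Int) 1).filter
        (fun i => decide (PySem.List.pyGetD arr i 0 ≤ PySem.List.pyGetD arr (i - 1) 0))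
      = (breaksN arr).map (fun k : Nat => (k : Int)) := by
    have hrange : PySem.List.pyRange 1 (arr.length : Int) 1
        = (List.range' 1 (arr.length - 1)).map (fun k : Nat => (k : Int)) := by
      rw [PySem.List.pyRange_one]
      have : ((arr.length : Int) - 1).toNat = arr.length - 1 := by omega
      rw [this, List.range'_eq_map_range]
      rw [List.map_map]
      apply List.map_congr_left
      intro k _
      simp [Nat.add_comm]
      omega
    rw [hrange, List.filter_map]
    unfold breaksN
    congr 1
    apply List.filter_congr
    intro k hk
    have hk1 : 1 ≤ k := (List.mem_range'_1.mp hk).1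
    have e1 : PySem.List.pyGetD arr ((k : Nat) : Int) 0 = arr.getD k 0 := by
      rw [PySem.List.pyGetD_natCast]
    have e2 : PySem.List.pyGetD arr (((k : Nat) : Int) - 1) 0 = arr.getD (k - 1) 0 := by
      rw [show (((k : Nat) : Int) - 1) = ((k - 1 : Nat) : Int) by omega, PySem.List.pyGetD_natCast]
    simp [Function.comp, e1, e2]
  -- Step 2: the whole bounds list is a cast
  have hbounds : ([(0 : Int)] ++ (breaksN arr).map (fun k : Nat => (k : Int)) ++ [(arr.length : Int)])
      = (0 :: (breaksN arr ++ [arr.length])).map (fun k : Nat => (k : Int)) := by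
    simp
  -- the Nat-level boundary tail
  set bsN : List Nat := breaksN arr ++ [arr.length] with hbsN
  have hmem : ∀ p ∈ ((0 :: bsN).zip bsN), p.2 ≤ arr.length := by
    intro p hp
    have h2 : p.2 ∈ bsN := (List.of_mem_zip hp).2
    rw [hbsN] at h2
    rcases List.mem_append.mp h2 with h | h
    · have := List.mem_range'_1.mp (List.mem_of_mem_filter h)
      omega
    · simp at h; omega
  show ((([(0 : Int)] ++ (PySem.List.pyRange 1 (arr.length : Int) 1).filter
        (fun i => decide (PySem.List.pyGetD arr i 0 ≤ PySem.List.pyGetD arr (i - 1) 0)) ++ [(arr.length : Int)]).zip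
        (PySem.List.slice ([(0 : Int)] ++ (PySem.List.pyRange 1 (arr.length : Int) 1).filter
        (fun i => decide (PySem.List.pyGetD arr i 0 ≤ PySem.List.pyGetD arr (i - 1) 0)) ++ [(arr.length : Int)]) (some 1) none)).filter
        (fun be => decide (be.2 - be.1 > 1))).map
      (fun be => PySem.List.slice arr (some be.1) (some be.2))
    = (runsSpec a ys).filter (fun run => decide (run.length > 1))
  rw [hbreaks, hbounds, PySem.List.slice_from_one]
  rw [show ((0 :: bsN).map (fun k : Nat => (k : Int))).tail = bsN.map (fun k : Nat => (k : Int)) by rfl]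
  rw [List.zip_map, List.filter_map, List.map_map]
  have hfun : ((fun be : Int × Int => PySem.List.slice arr (some be.1) (some be.2)) ∘
        Prod.map (fun k : Nat => (k : Int)) (fun k : Nat => (k : Int)))
      = fun be : Nat × Nat => (arr.drop be.1).take (be.2 - be.1) := by
    funext be
    simp [Function.comp, Prod.map, PySem.List.slice_natCast]
  have hfilt : ((fun be : Int × Int => decide (be.2 - be.1 > 1)) ∘
        Prod.map (fun k : Nat => (k : Int)) (fun k : Nat => (k : Int)))
      = fun be : Nat × Nat => decide (be.1 + 1 < be.2) := by
    funext be
    simp only [Function.comp, Prod.map]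
    apply decide_eq_decide.mpr
    omega
  rw [hfun, hfilt, filter_map_comm arr _ hmem, zip_tail_segs, hbsN, harr, segs_main]

-- ===== VERDICT (by name: the statement is the Claim_ definition above) =====
theorem cari_subderet_menaik_spec : Claim_equal_cari_subderet_menaik := by
  intro arr _ hpre
  unfold Spec_cari_subderet_menaik
  cases arr with
  | nil => exact absurd rfl hpre
  | cons a ys =>
    rw [A_side, B_side, A_loop]
    obtain ⟨t, cs, hr⟩ := runsSpec_shape ys a
    simp [hr]
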